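-- pv_equiv track=rewrite | github.com/EaseTheWorld/automate_fruit_box | solve.py | clear_range
-- ===== SOURCE A (Python) =====
-- def clear_range(matrix, cur_range):
-- 	r1, c1, r2, c2 = cur_range
-- 	return tuple(
-- 		tuple(0 if ci in range(c1,c2+1)
-- 			else cv
-- 			for ci,cv in enumerate(rv)) if ri in range(r1,r2+1)
-- 		else rv
-- 		for ri,rv in enumerate(matrix))
-- ===== SOURCE B (Python) =====
-- def clear_range(matrix, cur_range):
--     r1, c1, r2, c2 = cur_range
--     out = []
--     for i in range(len(matrix)):
--         rv = matrix[i]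
--         if r1 <= i <= r2:
--             lo = max(c1, 0)
--             hi = min(c2, len(rv) - 1)
--             if lo <= hi:
--                 rv = tuple(rv[:lo]) + (0,) * (hi - lo + 1) + tuple(rv[hi + 1:])
--             else:
--                 rv = tuple(rv)
--         else:
--             rv = tuple(rv)
--         out.append(rv)
--     return tuple(out)
-- ===== Notes on version B (the rewrite author's own statement) =====
-- stated objective: simpler
-- what changed: B replaces A's per-element range-membership test in every affected row by rebuilding the row as prefix + run of zeros + suffix with clamped column bounds, and copies unaffected rows whole.
import Mathlib
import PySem

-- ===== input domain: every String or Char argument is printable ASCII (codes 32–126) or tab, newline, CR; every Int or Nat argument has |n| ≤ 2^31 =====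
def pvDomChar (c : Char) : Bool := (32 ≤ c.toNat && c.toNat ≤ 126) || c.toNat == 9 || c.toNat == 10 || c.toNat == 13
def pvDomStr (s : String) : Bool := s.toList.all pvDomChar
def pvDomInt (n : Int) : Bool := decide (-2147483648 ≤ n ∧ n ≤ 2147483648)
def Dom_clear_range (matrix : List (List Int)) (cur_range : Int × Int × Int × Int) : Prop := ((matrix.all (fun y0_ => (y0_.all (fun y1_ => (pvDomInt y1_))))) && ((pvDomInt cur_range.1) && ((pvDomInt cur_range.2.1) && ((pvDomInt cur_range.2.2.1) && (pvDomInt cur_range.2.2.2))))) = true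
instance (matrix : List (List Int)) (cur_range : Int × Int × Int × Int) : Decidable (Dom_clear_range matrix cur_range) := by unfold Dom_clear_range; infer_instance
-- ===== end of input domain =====

-- B rebuilds each affected row by slicing (prefix ++ zeros ++ suffix) with clamped bounds
-- instead of A's per-element membership test: simpler row construction, same values.

-- ===== PORT A =====
-- A: nested comprehension over enumerate; `ci in range(c1, c2+1)` is `c1 ≤ ci ∧ ci ≤ c2`.
def clear_range (matrix : List (List Int)) (cur_range : Int × Int × Int × Int) : List (List Int) :=
  match cur_range with
  | (r1, c1, r2, c2) =>
    (PySem.List.enumerate matrix).map (fun p =>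
      if r1 ≤ p.1 ∧ p.1 ≤ r2 then
        (PySem.List.enumerate p.2).map (fun q => if c1 ≤ q.1 ∧ q.1 ≤ c2 then 0 else q.2)
      else p.2)

-- ===== PORT B =====
-- B: index loop over rows; affected rows rebuilt as take ++ replicate 0 ++ drop with clamped bounds.
def clear_range_alt (matrix : List (List Int)) (cur_range : Int × Int × Int × Int) : List (List Int) :=
  match cur_range with
  | (r1, c1, r2, c2) =>
    (List.range matrix.length).map (fun i =>
      let rv := matrix.getD i []
      if r1 ≤ (i : Int) ∧ (i : Int) ≤ r2 then
        let lo := max c1 0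
        let hi := min c2 ((rv.length : Int) - 1)
        if lo ≤ hi then
          rv.take lo.toNat ++ List.replicate (hi - lo + 1).toNat 0 ++ rv.drop (hi + 1).toNat
        else rv
      else rv)

-- ===== PRECONDITION & SPEC =====
def Spec_clear_range (matrix : List (List Int)) (cur_range : Int × Int × Int × Int) (out : List (List Int)) : Prop := out = clear_range_alt matrix cur_range
instance (matrix : List (List Int)) (cur_range : Int × Int × Int × Int) (out : List (List Int)) : Decidable (Spec_clear_range matrix cur_range out) := by unfold Spec_clear_range; infer_instance

-- ===== CLAIM (what is proved, stated in full; the proofs are below) =====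
def Claim_equal_clear_range : Prop := ∀ (matrix : List (List Int)) (cur_range : Int × Int × Int × Int), Dom_clear_range matrix cur_range → Spec_clear_range matrix cur_range (clear_range matrix cur_range)

-- ===== LEMMAS AND PROOFS =====

theorem row_eq (c1 c2 : Int) (rv : List Int) :
    (PySem.List.enumerate rv).map (fun q => if c1 ≤ q.1 ∧ q.1 ≤ c2 then (0 : Int) else q.2)
    = (if max c1 0 ≤ min c2 ((rv.length : Int) - 1) then
        rv.take (max c1 0).toNat ++ List.replicate (min c2 ((rv.length : Int) - 1) - max c1 0 + 1).toNat 0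
          ++ rv.drop (min c2 ((rv.length : Int) - 1) + 1).toNat
      else rv) := by
  apply List.ext_getElem
  · by_cases h : max c1 0 ≤ min c2 ((rv.length : Int) - 1) <;>
      simp [h, PySem.List.length_enumerate] <;> omega
  · intro j h1 h2
    by_cases h : max c1 0 ≤ min c2 ((rv.length : Int) - 1)
    · simp only [h, if_pos, List.getElem_map, PySem.List.getElem_enumerate,
        PySem.List.length_enumerate, List.length_map] at *
      have hj : j < rv.length := by simpa [PySem.List.length_enumerate] using h1
      simp only [List.append_assoc, List.getElem_append]
      have hA : (rv.take (max c1 0).toNat).length = (max c1 0).toNat := by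
        simp [List.length_take]; omega
      split_ifs with hc h₁ h₂ h₁ h₂
      · exfalso; rw [hA] at h₁; push_cast at hc; omega
      · rw [List.getElem_replicate]
      · exfalso; rw [hA] at h₁; simp [List.length_replicate] at h₂; push_cast at hc; omega
      · rw [List.getElem_take]
      · exfalso; rw [hA] at h₁ h₂; simp only [List.length_replicate] at h₂
        push_cast at hc; omega
      · rw [List.getElem_drop]
        congr 1
        rw [hA] at h₁ h₂ ⊢; simp [List.length_replicate] at h₂ ⊢
        push_cast at hc; omega
    · simp only [h, if_neg, not_false_iff] at *
      simp only [List.getElem_map, PySem.List.getElem_enumerate]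
      have hj : j < rv.length := by simpa [PySem.List.length_enumerate] using h1
      rw [if_neg]
      push_cast
      omega

-- ===== VERDICT (by name: the statement is the Claim_ definition above) =====
theorem clear_range_spec : Claim_equal_clear_range := by
  intro matrix cur_range _
  unfold Spec_clear_range clear_range clear_range_alt
  obtain ⟨r1, c1, r2, c2⟩ := cur_range
  apply List.ext_getElem
  · simp [PySem.List.length_enumerate]
  · intro i h1 h2
    have hi : i < matrix.length := by simpa [PySem.List.length_enumerate] using h1
    simp only [List.getElem_map, PySem.List.getElem_enumerate, List.getElem_range,
      List.getD_eq_getElem?_getD, List.getElem?_eq_getElem hi, Option.getD_some]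
    simp only [Int.zero_add]
    by_cases hr : r1 ≤ (i : Int) ∧ (i : Int) ≤ r2
    · simp only [hr, if_true]
      exact row_eq c1 c2 matrix[i]
    · simp [hr]
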